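-- pv_equiv track=rewrite | github.com/yuheesong/pythonalgorithm_study | SH/과일장수.py | solution
-- ===== SOURCE A (Python) =====
-- def solution(k, m, score):
--     answer = 0
--     score.sort(reverse=True)
--     add_min=0
--     split_list=[]
--
--     #사과를 m개의 상자로 나누어 담기(리스트 분할)
--     for i in range(0,len(score),m): #0 부터 배열의 최대길이까지 n 개 씩 증가
--         split_list.append(score[i:i+m])
--
--     #각 박스별 최저 사과점수 산출
--     for i in split_list:
--         if len(i)==m:#조건:상자단위로 판매하기 때문에 나머지는 버린다.
--             add_min+=min(i) #모든 상자에 담긴 최저 사과점수를 누적합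
--
--     answer=add_min*m
--
--     return answer
-- ===== SOURCE B (Python) =====
-- def solution(k, m, score):
--     # Counting approach: no chunk lists, no min(), no sort of the score list itself.
--     # (Does not mutate `score`, unlike the original which sorts it in place.)
--     if len(score) // m <= 0:
--         return 0
--     counts = {}
--     for v in score:
--         counts[v] = counts.get(v, 0) + 1
--     total = 0
--     pos = 0
--     for v in sorted(counts, reverse=True):
--         c = counts[v]
--         total += v * ((pos + c) // m - pos // m)
--         pos += c
--     return total * m
-- ===== Notes on version B (the rewrite author's own statement) =====
-- stated objective: alternative
-- what changed: B replaces sort-then-chunk-then-min entirely: it counts occurrences in a dict, walks the distinct values in descending order, and for each value adds value * (number of box-boundary ranks falling inside that value's run), computed by floor-division rank arithmetic; no chunk lists, no min(), and the score list itself is never sorted (B does not mutate score, unlike A).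
import Mathlib
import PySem

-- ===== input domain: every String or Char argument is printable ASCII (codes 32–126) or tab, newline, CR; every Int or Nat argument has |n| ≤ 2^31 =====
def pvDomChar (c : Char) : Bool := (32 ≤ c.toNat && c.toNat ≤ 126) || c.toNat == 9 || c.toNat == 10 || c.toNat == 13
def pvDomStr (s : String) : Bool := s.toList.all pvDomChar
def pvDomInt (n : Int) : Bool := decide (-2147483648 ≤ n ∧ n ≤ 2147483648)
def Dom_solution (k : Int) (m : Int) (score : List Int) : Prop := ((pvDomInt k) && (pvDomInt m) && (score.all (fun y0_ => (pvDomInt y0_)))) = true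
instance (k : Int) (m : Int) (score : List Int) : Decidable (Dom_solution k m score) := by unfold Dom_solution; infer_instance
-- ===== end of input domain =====

-- B replaces sort-then-chunk-then-min by a counting algorithm: a dict of occurrence counts, a
-- descending walk over the distinct values, and floor-division rank arithmetic per value run
-- (objective: alternative). A sorts `score` in place, B never mutates it; the equivalence proved
-- here is about the return value.


-- ===== PORT A =====
-- min(i): Python raises on an empty list; the branch guard `len(i)==m` makes the chunk nonempty
-- whenever m ≠ 0 (Pre_), so the `.getD 0` default is never taken on admitted inputs.
def solution (k : Int) (m : Int) (score : List Int) : Int :=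
  let sc := PySem.List.sorted score (fun x => x) true
  let splitList := (PySem.List.pyRange 0 (sc.length : Int) m).map
      (fun i => PySem.List.slice sc (some i) (some (i + m)))
  let addMin := splitList.foldl
      (fun acc chunk => if (chunk.length : Int) = m then
          acc + (PySem.List.min? chunk (fun x => x)).getD 0 else acc) 0
  addMin * m

-- ===== PORT B =====
def solution_alt (k : Int) (m : Int) (score : List Int) : Int :=
  if PySem.Int.floordiv (score.length : Int) m ≤ 0 then 0
  else
    let counts := score.foldl (fun d v => d.insert v (d.getD v 0 + 1)) PySem.Dict.empty
    let st := (PySem.List.sorted counts.keys (fun x => x) true).foldl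
        (fun (st : Int × Int) v =>
          let c := counts.getD v 0
          (st.1 + v * (PySem.Int.floordiv (st.2 + c) m - PySem.Int.floordiv st.2 m), st.2 + c))
        (0, 0)
    st.1 * m

-- ===== PRECONDITION & SPEC =====
-- Pre_ excludes only m = 0, where A raises ValueError (range() with step 0) and B raises ZeroDivisionError.
def Pre_solution (k : Int) (m : Int) (score : List Int) : Prop := m ≠ 0
instance (k : Int) (m : Int) (score : List Int) : Decidable (Pre_solution k m score) := by unfold Pre_solution; infer_instance
def pvWitness_solution : Int × Int × List Int := (0, 3, [1, 2, 5, 3, 2, 1, 4])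

def Spec_solution (k : Int) (m : Int) (score : List Int) (out : Int) : Prop := out = solution_alt k m score
instance (k : Int) (m : Int) (score : List Int) (out : Int) : Decidable (Spec_solution k m score out) := by unfold Spec_solution; infer_instance

-- ===== CLAIM (what is proved, stated in full; the proofs are below) =====
def Claim_equal_solution : Prop := ∀ (k : Int) (m : Int) (score : List Int), Dom_solution k m score → Pre_solution k m score → Spec_solution k m score (solution k m score)

-- ===== LEMMAS AND PROOFS =====

-- 1 when rank p+1 is a box boundary (a multiple of m'), else 0
def pvDelta (m' : Nat) (p : Nat) : Int := if (p + 1) % m' = 0 then 1 else 0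

-- sum of L[i] over the box-boundary ranks, the list starting at global position p
def pvSd (m' : Nat) (L : List Int) (p : Nat) : Int :=
  ((List.range L.length).map (fun i => L.getD i 0 * pvDelta m' (p + i))).sum

-- the expansion of a distinct-value list back into runs, with multiplicities from `score`
def pvExp (score : List Int) (D : List Int) : List Int :=
  D.flatMap (fun v => List.replicate (score.count v) v)

lemma pvSd_nil (m' : Nat) (p : Nat) : pvSd m' [] p = 0 := by simp [pvSd]

lemma pvSd_cons (m' : Nat) (x : Int) (L : List Int) (p : Nat) :
    pvSd m' (x :: L) p = x * pvDelta m' p + pvSd m' L (p + 1) := by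
  unfold pvSd
  rw [List.length_cons, List.range_succ_eq_map, List.map_cons, List.map_map, List.sum_cons]
  congr 1
  apply congrArg
  apply List.map_congr_left
  intro i _
  have he : p + (i + 1) = p + 1 + i := by omega
  simp [Function.comp_def, Nat.succ_eq_add_one, he]

lemma pvSd_append (m' : Nat) (xs ys : List Int) (p : Nat) :
    pvSd m' (xs ++ ys) p = pvSd m' xs p + pvSd m' ys (p + xs.length) := by
  induction xs generalizing p with
  | nil => simp [pvSd_nil]
  | cons x t ih =>
      rw [List.cons_append, pvSd_cons, pvSd_cons, ih (p + 1)]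
      ring_nf
      rw [List.length_cons]
      ring_nf

lemma pvSd_replicate (m' : Nat) (hm : 0 < m') (v : Int) (c p : Nat) :
    pvSd m' (List.replicate c v) p
      = v * ((((p + c) / m' : Nat) : Int) - (((p / m' : Nat)) : Int)) := by
  induction c generalizing p with
  | zero => simp [pvSd_nil]
  | succ c ih =>
      rw [List.replicate_succ, pvSd_cons, ih (p + 1)]
      have hsd : (p + 1) / m' = p / m' + if m' ∣ p + 1 then 1 else 0 := Nat.succ_div
      have hdv : m' ∣ p + 1 ↔ (p + 1) % m' = 0 := Nat.dvd_iff_mod_eq_zero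
      have he : p + 1 + c = p + (c + 1) := by omega
      rw [he]
      unfold pvDelta
      by_cases h : m' ∣ p + 1
      · rw [if_pos (hdv.mp h), hsd, if_pos h]
        push_cast
        ring
      · rw [if_neg (fun hc => h (hdv.mpr hc)), hsd, if_neg h]
        push_cast
        ring

-- the boundary-rank sum over all of range n collapses to the every-m'-th-index sum
lemma pvSum_delta (m' : Nat) (hm : 0 < m') (g : Nat → Int) :
    ∀ n : Nat, ((List.range n).map (fun i => g i * pvDelta m' i)).sum
      = ((List.range (n / m')).map (fun j => g (j * m' + m' - 1))).sum := by
  intro n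
  induction n with
  | zero => simp
  | succ n ih =>
      rw [List.range_succ, List.map_append, List.sum_append, ih]
      have hsd : (n + 1) / m' = n / m' + if m' ∣ n + 1 then 1 else 0 := Nat.succ_div
      have hdv : m' ∣ n + 1 ↔ (n + 1) % m' = 0 := Nat.dvd_iff_mod_eq_zero
      by_cases h : m' ∣ n + 1
      · rw [if_pos h] at hsd
        rw [hsd, List.range_succ, List.map_append, List.sum_append]
        have hidx : (n / m') * m' + m' - 1 = n := by
          obtain ⟨q, hq⟩ := h
          obtain ⟨q0, rfl⟩ : ∃ q0, q = q0 + 1 := by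
            refine ⟨q - 1, ?_⟩
            rcases Nat.eq_zero_or_pos q with h0 | h0
            · subst h0; simp at hq
            · omega
          have hn : n = m' * q0 + (m' - 1) := by
            have : m' * (q0 + 1) = m' * q0 + m' := by ring
            omega
          have hdiv : n / m' = q0 := by
            rw [hn, Nat.mul_add_div hm]
            have : (m' - 1) / m' = 0 := Nat.div_eq_of_lt (by omega)
            omega
          rw [hdiv, Nat.mul_comm q0 m']
          omega
        have hδ : pvDelta m' n = 1 := by
          unfold pvDelta
          rw [if_pos (hdv.mp h)]
        simp [hidx, hδ]
      · rw [if_neg h] at hsd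
        have hδ : pvDelta m' n = 0 := by
          unfold pvDelta
          rw [if_neg (fun hc => h (hdv.mpr hc))]
        simp [hsd, hδ]

-- characterization of B's fold over a distinct-value list, any start state
lemma foldB_char (score : List Int) (m' : Nat) (hm : 0 < m') :
    ∀ (D : List Int) (t : Int) (p : Nat),
      (D.foldl
        (fun (st : Int × Int) v =>
          let c := (PySem.Dict.counter score).getD v 0
          (st.1 + v * (PySem.Int.floordiv (st.2 + c) (m' : Int) - PySem.Int.floordiv st.2 (m' : Int)),
           st.2 + c))
        (t, (p : Int)))
      = (t + pvSd m' (pvExp score D) p, ((p + (pvExp score D).length : Nat) : Int)) := by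
  intro D
  induction D with
  | nil => intro t p; simp [pvExp, pvSd_nil]
  | cons v D' ih =>
      intro t p
      rw [List.foldl_cons]
      have hc : (PySem.Dict.counter score).getD v 0 = (score.count v : Int) :=
        PySem.Dict.getD_counter score v
      have hcast : (p : Int) + (score.count v : Int) = ((p + score.count v : Nat) : Int) := by
        push_cast; ring
      simp only [hc, hcast, PySem.Int.floordiv_natCast]
      rw [show ((p + score.count v : Nat) : Int) = (((p + score.count v : Nat) : Nat) : Int) from rfl,
          ih (t + v * ((((p + score.count v) / m' : Nat) : Int) - (((p / m' : Nat)) : Int)))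
             (p + score.count v)]
      have hexp : pvExp score (v :: D') = List.replicate (score.count v) v ++ pvExp score D' := by
        simp [pvExp]
      refine Prod.ext ?_ ?_
      · dsimp only
        rw [hexp, pvSd_append, pvSd_replicate m' hm, List.length_replicate]
        ring
      · dsimp only
        rw [hexp, List.length_append, List.length_replicate]
        omega

-- counts in the expansion of a nodup distinct-value list
lemma count_pvExp (score : List Int) (a : Int) :
    ∀ D : List Int, D.Nodup →
      (pvExp score D).count a = if a ∈ D then score.count a else 0 := by
  intro D
  induction D with
  | nil => intro _; simp [pvExp]
  | cons v D' ih =>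
      intro hnd
      rw [List.nodup_cons] at hnd
      have hexp : pvExp score (v :: D') = List.replicate (score.count v) v ++ pvExp score D' := by
        simp [pvExp]
      rw [hexp, List.count_append, List.count_replicate, ih hnd.2]
      by_cases hav : a = v
      · subst hav
        simp [hnd.1]
      · simp [hav, Ne.symm hav]

-- the expansion of the sorted distinct values is a permutation of score
lemma pvExp_perm (score : List Int) :
    (pvExp score (PySem.List.sorted (PySem.Set.ofList score) (fun x => x) true)).Perm score := by
  set D := PySem.List.sorted (PySem.Set.ofList score) (fun x => x) true with hD
  have hnd : D.Nodup :=
    (PySem.List.sorted_perm (PySem.Set.ofList score) (fun x => x) true).nodup_iff.mpr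
      (PySem.Set.nodup_ofList score)
  apply List.perm_iff_count.mpr
  intro a
  rw [count_pvExp score a D hnd]
  by_cases ha : a ∈ D
  · simp [ha]
  · have hns : a ∉ score := by
      intro hs
      exact ha ((PySem.List.mem_sorted _ _ _ _).mpr ((PySem.Set.mem_ofList _ _).mpr hs))
    simp [ha, List.count_eq_zero.mpr hns]

-- the expansion of a strictly descending list is (weakly) descending
lemma pvExp_pairwise (score : List Int) :
    ∀ D : List Int, D.Pairwise (fun a b => b < a) →
      (pvExp score D).Pairwise (fun a b : Int => b ≤ a) := by
  intro D
  induction D with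
  | nil => intro _; simp [pvExp]
  | cons v D' ih =>
      intro hp
      rw [List.pairwise_cons] at hp
      have hexp : pvExp score (v :: D') = List.replicate (score.count v) v ++ pvExp score D' := by
        simp [pvExp]
      rw [hexp, List.pairwise_append]
      refine ⟨?_, ih hp.2, ?_⟩
      · exact List.pairwise_replicate.mpr (Or.inr (le_refl v))
      · intro x hx y hy
        rw [List.eq_of_mem_replicate hx]
        obtain ⟨w, hw, hyw⟩ := List.mem_flatMap.mp hy
        rw [List.eq_of_mem_replicate hyw]
        exact le_of_lt (hp.1 w hw)

-- the expansion IS the descending-sorted score list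
lemma pvExp_eq_sorted (score : List Int) :
    pvExp score (PySem.List.sorted (PySem.Set.ofList score) (fun x => x) true)
      = PySem.List.sorted score (fun x => x) true := by
  set D := PySem.List.sorted (PySem.Set.ofList score) (fun x => x) true with hD
  set E := pvExp score D with hE
  set sc := PySem.List.sorted score (fun x => x) true with hsc
  have hDp : D.Pairwise (fun a b : Int => b < a) := by
    have h1 : D.Pairwise (fun a b : Int => b ≤ a) :=
      PySem.List.sorted_pairwise_rev (PySem.Set.ofList score) (fun x => x)
    have hnd : D.Nodup :=
      (PySem.List.sorted_perm (PySem.Set.ofList score) (fun x => x) true).nodup_iff.mpr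
        (PySem.Set.nodup_ofList score)
    exact (h1.and hnd).imp (fun h => lt_of_le_of_ne h.1 (Ne.symm h.2))
  have hEp : E.Pairwise (fun a b : Int => b ≤ a) := pvExp_pairwise score D hDp
  have hscp : sc.Pairwise (fun a b : Int => b ≤ a) := PySem.List.sorted_pairwise_rev score _
  have hperm : E.Perm sc :=
    (pvExp_perm score).trans (PySem.List.sorted_perm score (fun x => x) true).symm
  have hrev : E.reverse = sc.reverse := by
    apply PySem.List.eq_of_perm_of_pairwise_le_of_injective (fun x : Int => x)
      (fun a b h => h) ((List.reverse_perm E).trans (hperm.trans (List.reverse_perm sc).symm))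
    · exact (List.pairwise_reverse).mpr hEp
    · exact (List.pairwise_reverse).mpr hscp
  exact List.reverse_injective hrev

-- ===== A-side lemmas (as in the chunk analysis of A) =====

-- min of a nonempty descending-sorted list is its last element (as a getD lookup)
lemma min_getD_last (l : List Int) (hp : l.Pairwise (fun a b => b ≤ a)) (h : l ≠ []) :
    (PySem.List.min? l (fun x => x)).getD 0 = l.getD (l.length - 1) 0 := by
  obtain ⟨v, hv⟩ : ∃ v, PySem.List.min? l (fun x => x) = some v := by
    cases hmin : PySem.List.min? l (fun x => x) with
    | none => exact absurd ((PySem.List.min?_eq_none_iff l _).mp hmin) h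
    | some v => exact ⟨v, rfl⟩
  have hlen : 0 < l.length := List.length_pos_iff.mpr h
  have hlast : l.length - 1 < l.length := by omega
  have hminle := PySem.List.min?_isMin hv
  obtain ⟨i, hi, hiv⟩ := List.mem_iff_getElem.mp (PySem.List.min?_mem hv)
  have h1 : v ≤ l[l.length - 1] := hminle _ (List.getElem_mem hlast)
  have h2 : l[l.length - 1] ≤ v := by
    rcases Nat.lt_or_ge i (l.length - 1) with hlt | hge
    · have := List.pairwise_iff_getElem.mp hp i (l.length - 1) hi hlast hlt
      simpa [hiv] using this
    · have : i = l.length - 1 := by omega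
      simp [← hiv, this]
  rw [hv]
  simp [List.getD_eq_getElem?_getD, List.getElem?_eq_getElem hlast, le_antisymm h1 h2]

-- the box starting at index m'*k, as Python slices it, is take m' (drop (m'*k) sc)
lemma chunk_eq (sc : List Int) (m' k : Nat) :
    PySem.List.slice sc (some ((m' : Int) * (k : Int))) (some ((m' : Int) * (k : Int) + (m' : Int)))
      = List.take m' (List.drop (m' * k) sc) := by
  rw [PySem.List.slice_toNat sc (by positivity) (by positivity)]
  have e1 : ((m' : Int) * (k : Int)).toNat = m' * k := by
    rw [show (m' : Int) * (k : Int) = ((m' * k : Nat) : Int) by push_cast; ring, Int.toNat_natCast]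
  have e2 : ((m' : Int) * (k : Int) + (m' : Int)).toNat = m' * k + m' := by
    rw [show (m' : Int) * (k : Int) + (m' : Int) = ((m' * k + m' : Nat) : Int) by push_cast; ring,
        Int.toNat_natCast]
  rw [e1, e2]
  congr 1
  omega

-- a full box: the guarded min-term is the box's last element
lemma term_full (sc : List Int) (hp : sc.Pairwise (fun a b => b ≤ a)) (m' k : Nat)
    (hm : 0 < m') (hk : m' * k + m' ≤ sc.length) :
    (if (((List.take m' (List.drop (m' * k) sc)).length : Int) = (m' : Int)) then
        (PySem.List.min? (List.take m' (List.drop (m' * k) sc)) (fun x => x)).getD 0 else 0)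
      = sc.getD (k * m' + m' - 1) 0 := by
  set c := List.take m' (List.drop (m' * k) sc) with hc
  have hlen : c.length = m' := by simp [hc]; omega
  have hcp : c.Pairwise (fun a b : Int => b ≤ a) :=
    List.Pairwise.sublist ((List.take_sublist _ _).trans (List.drop_sublist _ _)) hp
  have hne : c ≠ [] := by intro h; rw [h] at hlen; simp at hlen; omega
  rw [if_pos (by exact_mod_cast hlen), min_getD_last c hcp hne, hlen]
  have e : k * m' + m' - 1 = m' * k + (m' - 1) := by rw [Nat.mul_comm m' k]; omega
  rw [e, List.getD_eq_getElem?_getD, List.getD_eq_getElem?_getD, hc,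
      List.getElem?_take, if_pos (by omega), List.getElem?_drop]

-- a partial box: the guard fails and the term is 0
lemma term_zero (sc : List Int) (m' k : Nat) (hm : 0 < m') (hk : sc.length < m' * k + m') :
    (if (((List.take m' (List.drop (m' * k) sc)).length : Int) = (m' : Int)) then
        (PySem.List.min? (List.take m' (List.drop (m' * k) sc)) (fun x => x)).getD 0 else 0) = 0 := by
  rw [if_neg]
  intro h
  have : (List.take m' (List.drop (m' * k) sc)).length = m' := by exact_mod_cast h
  simp at this
  omega

-- A's value for positive m: the every-m'-th-index sum over the descending sort, times m'
lemma A_char (k : Int) (score : List Int) (m' : Nat) (hm' : 0 < m') :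
    solution k (m' : Int) score
      = ((List.range ((PySem.List.sorted score (fun x => x) true).length / m')).map
          (fun j => (PySem.List.sorted score (fun x => x) true).getD (j * m' + m' - 1) 0)).sum
        * (m' : Int) := by
  unfold solution
  dsimp only
  set sc := PySem.List.sorted score (fun x => x) true with hsc
  have hp : sc.Pairwise (fun a b : Int => b ≤ a) := PySem.List.sorted_pairwise_rev score _
  have hm : (0 : Int) < (m' : Int) := by exact_mod_cast hm'
  set n' := sc.length with hn
  rw [PySem.List.pyRange_of_pos 0 (n' : Int) hm]
  have hT : (if (0:Int) < (n' : Int) then (((n' : Int) - 0 + (m' : Int) - 1) / (m' : Int)).toNat else 0)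
      = (n' + m' - 1) / m' := by
    split
    · next h =>
      have he : ((n' : Int) - 0 + (m' : Int) - 1) = ((n' + m' - 1 : Nat) : Int) := by omega
      rw [he, ← Int.natCast_div, Int.toNat_natCast]
    · next h =>
      have hz : n' = 0 := by omega
      rw [hz]
      symm
      simp
      omega
  rw [hT]
  set T := (n' + m' - 1) / m' with hTdef
  set B := n' / m' with hBdef
  rw [List.map_map]
  have hstep : (fun (acc : Int) (chunk : List Int) =>
      if (chunk.length : Int) = (m' : Int) then
        acc + (PySem.List.min? chunk (fun x => x)).getD 0 else acc)
    = fun acc chunk => acc + (if (chunk.length : Int) = (m' : Int) then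
        (PySem.List.min? chunk (fun x => x)).getD 0 else 0) := by
    funext acc chunk; split <;> simp
  rw [hstep, PySem.List.foldl_add, List.map_map]
  simp only [zero_add, Function.comp_def]
  congr 1
  have hAfun : List.map (fun kk : Nat =>
        if (((PySem.List.slice sc (some ((m' : Int) * (kk : Int)))
            (some ((m' : Int) * (kk : Int) + (m' : Int)))).length : Int) = (m' : Int)) then
          (PySem.List.min? (PySem.List.slice sc (some ((m' : Int) * (kk : Int)))
            (some ((m' : Int) * (kk : Int) + (m' : Int)))) (fun x => x)).getD 0 else 0)
        (List.range T)
      = List.map (fun kk : Nat =>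
          if (((List.take m' (List.drop (m' * kk) sc)).length : Int) = (m' : Int)) then
            (PySem.List.min? (List.take m' (List.drop (m' * kk) sc)) (fun x => x)).getD 0 else 0)
        (List.range T) := by
    apply List.map_congr_left
    intro kk _
    rw [chunk_eq sc m' kk]
  rw [hAfun]
  have hBT : B ≤ T := Nat.div_le_div_right (by omega)
  rw [show T = B + (T - B) by omega, List.range_add, List.map_append, List.sum_append]
  have hz : (List.map ((fun kk : Nat =>
          if (((List.take m' (List.drop (m' * kk) sc)).length : Int) = (m' : Int)) then
            (PySem.List.min? (List.take m' (List.drop (m' * kk) sc)) (fun x => x)).getD 0 else 0)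
          ∘ fun x => B + x)
        (List.range (T - B))).sum = 0 := by
    apply List.sum_eq_zero
    intro x hx
    simp only [List.mem_map, List.mem_range, Function.comp_def] at hx
    obtain ⟨z, hz1, rfl⟩ := hx
    apply term_zero sc m' (B + z) hm'
    have h1 := Nat.div_add_mod n' m'
    have h2 := Nat.mod_lt n' hm'
    nlinarith
  rw [List.map_map, hz, add_zero]
  apply congrArg List.sum
  apply List.map_congr_left
  intro kk hkk
  simp only [List.mem_range] at hkk
  have hle : m' * kk + m' ≤ n' := by
    have : (kk + 1) * m' ≤ n' := (Nat.le_div_iff_mul_le hm').mp (by omega)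
    nlinarith
  rw [term_full sc hp m' kk hm' hle]

-- ===== VERDICT (by name: the statement is the Claim_ definition above) =====
theorem solution_spec : Claim_equal_solution := by
  intro k m score hdom hpre
  unfold Spec_solution
  have hpre' : m ≠ 0 := hpre
  rcases lt_trichotomy m 0 with hm | hm | hm
  · -- negative m: A's range is empty, B's box count is ≤ 0
    have hb : PySem.Int.floordiv (score.length : Int) m ≤ 0 := by
      have hdm := PySem.Int.floordiv_mul_add_mod (score.length : Int) m
      have hbd := PySem.Int.mod_neg_bounds (score.length : Int) hm
      by_contra hq
      rw [Int.not_le] at hq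
      nlinarith [Int.natCast_nonneg score.length]
    rw [show solution_alt k m score = 0 by unfold solution_alt; rw [if_pos hb]]
    unfold solution
    dsimp only
    set sc := PySem.List.sorted score (fun x => x) true with hsc
    have h1 : ¬ (0 : Int) < m := by omega
    have h2 : ¬ ((sc.length : Int) < 0) := by omega
    rw [show PySem.List.pyRange 0 (sc.length : Int) m = [] by
      simp [PySem.List.pyRange, hpre', h1, h2]]
    simp
  · exact absurd hm hpre'
  · -- positive m
    obtain ⟨m', rfl⟩ : ∃ m' : Nat, m = (m' : Nat) := ⟨m.toNat, by omega⟩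
    have hm' : 0 < m' := by exact_mod_cast hm
    set sc := PySem.List.sorted score (fun x => x) true with hsc
    have hlen : sc.length = score.length := PySem.List.length_sorted score _ true
    rw [A_char k score m' hm']
    unfold solution_alt
    rw [show PySem.Int.floordiv (score.length : Int) (m' : Int)
        = ((score.length / m' : Nat) : Int) from PySem.Int.floordiv_natCast _ _]
    by_cases hb : score.length / m' = 0
    · rw [if_pos (show ((score.length / m' : Nat) : Int) ≤ 0 by rw [hb]; norm_num)]
      rw [← hsc, hlen, hb]
      simp
    · rw [if_neg (by
        intro hle
        have : (score.length / m' : Nat) = 0 := by exact_mod_cast le_antisymm hle (by positivity)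
        exact hb this)]
      dsimp only
      rw [PySem.Dict.foldl_insert_getD_add_one_eq_counter score, PySem.Dict.keys_counter score]
      have hfb := foldB_char score m' hm'
        (PySem.List.sorted (PySem.Set.ofList score) (fun x => x) true) 0 0
      dsimp only at hfb
      rw [show ((0 : Int), (0 : Int)) = ((0 : Int), ((0 : Nat) : Int)) by norm_num]
      rw [hfb]
      rw [pvExp_eq_sorted score, ← hsc]
      dsimp only
      rw [zero_add]
      congr 1
      have hps : pvSd m' sc 0
          = ((List.range sc.length).map (fun i => sc.getD i 0 * pvDelta m' i)).sum := by
        unfold pvSd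
        apply congrArg
        apply List.map_congr_left
        intro i _
        rw [Nat.zero_add]
      rw [hps, pvSum_delta m' hm' (fun i => sc.getD i 0) sc.length, hlen]
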